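-- pv_equiv track=rewrite | github.com/benquick123/code-profiling | code/batch-2/vse-naloge-brez-testov/DN7-M-047.py | polje_v_mine
-- ===== SOURCE A (Python) =====
-- def polje_v_mine(polje):
--     """
--     Vrni koordinate min v podanem polju.
--
--     Niz polje opisuje polje tako, da so vodoravne "vrstice" polja ločene s
--     presledki. Prosta polja so označena z znako `.`, mine z `X`.
--
--     Args:
--         polje (str): polje
--
--     Returns:
--         mine (set of tuple of int): koordinate min
--         s (int): širina polja
--         v (int): višina polja.
--     """
--     x = y = 0
--     mine  = set()
--     for i in range(len(polje)):
--         if polje[i] == 'X':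
--             mine.add((x, y))
--
--         if polje[i] == ' ' and i != len(polje) - 1:
--             x = 0
--             y = y + 1
--         else:
--             x += 1
--
--         if polje[i] == ' ' and i == len(polje) - 1:
--             x -= 1
--     y += 1
--
--     return (mine, x, y)
-- ===== SOURCE B (Python) =====
-- def polje_v_mine(polje):
--     rows = polje.split(' ')
--     if polje.endswith(' '):
--         rows.pop()
--     mine = {(x, y) for y, row in enumerate(rows) for x, ch in enumerate(row) if ch == 'X'}
--     return mine, len(rows[-1]), len(rows)
-- ===== Notes on version B (the rewrite author's own statement) =====
-- stated objective: simpler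
-- what changed: Replaces A's single-pass index loop with manual column/row counters and last-index special cases by a split-on-space decomposition: split into rows (dropping the one empty row a trailing space produces), collect mines with a nested enumerate comprehension, and read width/height off the row list.
import Mathlib
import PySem

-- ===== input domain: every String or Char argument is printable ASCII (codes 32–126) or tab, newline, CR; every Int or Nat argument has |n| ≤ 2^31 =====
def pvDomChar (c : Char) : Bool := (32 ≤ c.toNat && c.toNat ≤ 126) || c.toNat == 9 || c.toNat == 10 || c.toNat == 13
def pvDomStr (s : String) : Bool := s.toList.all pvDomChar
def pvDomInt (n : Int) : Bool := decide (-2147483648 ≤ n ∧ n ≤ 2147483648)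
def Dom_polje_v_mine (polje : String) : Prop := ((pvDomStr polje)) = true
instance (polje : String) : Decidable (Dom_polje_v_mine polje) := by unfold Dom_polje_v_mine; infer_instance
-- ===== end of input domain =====

-- B replaces A's single-pass index loop (manual column/row counters with last-index special
-- cases) by a split-on-space decomposition; objective: simpler.

-- ===== PORT A =====
-- loop body of A: state is (x, y, mine), ic is (i, polje[i]), n = len(polje)
def pvStepA (n : Int) (st : Int × Int × PySem.Set (Int × Int)) (ic : Int × Char) :
    Int × Int × PySem.Set (Int × Int) :=
  let mine := if ic.2 = 'X' then PySem.Set.add st.2.2 (st.1, st.2.1) else st.2.2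
  let xy : Int × Int := if ic.2 = ' ' ∧ ic.1 ≠ n - 1 then (0, st.2.1 + 1) else (st.1 + 1, st.2.1)
  let x2 : Int := if ic.2 = ' ' ∧ ic.1 = n - 1 then xy.1 - 1 else xy.1
  (x2, xy.2, mine)

def polje_v_mine (polje : String) : (List (Int × Int)) × Int × Int :=
  let cs := polje.toList
  let st := (PySem.List.enumerate cs).foldl (pvStepA (cs.length : Int)) (0, 0, PySem.Set.empty)
  (st.2.2, st.1, st.2.1 + 1)

-- ===== PORT B =====
def polje_v_mine_alt (polje : String) : (List (Int × Int)) × Int × Int :=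
  let rows0 := PySem.Chars.splitOn polje.toList [' ']          -- polje.split(' ')
  let rows := if PySem.Chars.endswith polje.toList [' '] then rows0.dropLast else rows0  -- rows.pop()
  let mine : PySem.Set (Int × Int) := PySem.Set.ofList
    ((PySem.List.enumerate rows).flatMap fun yr =>
      (PySem.List.enumerate yr.2).filterMap fun xc =>
        if xc.2 = 'X' then some (xc.1, yr.1) else none)
  (mine, (((PySem.List.pyGet? rows (-1)).getD []).length : Int), (rows.length : Int))

-- ===== PRECONDITION & SPEC =====
def Spec_polje_v_mine (polje : String) (out : (List (Int × Int)) × Int × Int) : Prop := out = polje_v_mine_alt polje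
instance (polje : String) (out : (List (Int × Int)) × Int × Int) : Decidable (Spec_polje_v_mine polje out) := by unfold Spec_polje_v_mine; infer_instance

-- ===== CLAIM (what is proved, stated in full; the proofs are below) =====
def Claim_equal_polje_v_mine : Prop := ∀ (polje : String), Dom_polje_v_mine polje → Spec_polje_v_mine polje (polje_v_mine polje)

-- ===== LEMMAS AND PROOFS =====

-- structural version of s.split(' ')
def pvRows : List Char → List (List Char)
  | [] => [[]]
  | c :: s =>
    if c = ' ' then [] :: pvRows s
    else match pvRows s with
      | [] => [[c]]
      | h :: t => (c :: h) :: t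

-- the X-coordinates of one row, columns starting at x0, row index y
def pvRowMines (r : List Char) (x0 y : Int) : List (Int × Int) :=
  (PySem.List.enumerate r x0).filterMap fun xc => if xc.2 = 'X' then some (xc.1, y) else none

-- the X-coordinates of a list of rows, rows indexed from y0, columns from 0
def pvMinesTail : List (List Char) → Int → List (Int × Int)
  | [], _ => []
  | r :: rs, y => pvRowMines r 0 y ++ pvMinesTail rs (y + 1)

-- simple per-character step (no index tests): what A's loop body does away from the last index
def pvStepS (st : Int × Int × PySem.Set (Int × Int)) (c : Char) :
    Int × Int × PySem.Set (Int × Int) :=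
  let mine := if c = 'X' then PySem.Set.add st.2.2 (st.1, st.2.1) else st.2.2
  if c = ' ' then (0, st.2.1 + 1, mine) else (st.1 + 1, st.2.1, mine)

def pvWidth (rows : List (List Char)) (x : Int) : Int :=
  match rows with
  | [] => x
  | r :: rs => if rs = [] then x + (r.length : Int) else ((rs.getLastD []).length : Int)

def pvMines (rows : List (List Char)) (x y : Int) : List (Int × Int) :=
  match rows with
  | [] => []
  | r :: rs => pvRowMines r x y ++ pvMinesTail rs (y + 1)

lemma pvRows_ne_nil (cs : List Char) : pvRows cs ≠ [] := by
  cases cs with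
  | nil => simp [pvRows]
  | cons c s =>
    simp only [pvRows]
    split
    · simp
    · split <;> simp

lemma pvGo_space (fuel : Nat) : ∀ (l cur : List Char) (acc : List (List Char)),
    l.length ≤ fuel →
    PySem.Chars.splitOn.go [' '] fuel l cur acc =
      acc.reverse ++ (match pvRows l with
        | [] => [cur.reverse]
        | h :: t => (cur.reverse ++ h) :: t) := by
  induction fuel with
  | zero =>
    intro l cur acc h
    have hl : l = [] := by simpa using h
    subst hl
    simp [PySem.Chars.splitOn.go, pvRows]
  | succ fuel ih =>
    intro l cur acc h
    cases l with
    | nil => simp [PySem.Chars.splitOn.go, pvRows]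
    | cons c rest =>
      by_cases hc : c = ' '
      · subst hc
        have hpre : [' '].isPrefixOf (' ' :: rest) = true := by simp [List.isPrefixOf]
        rw [PySem.Chars.splitOn.go, if_pos hpre]
        simp only [show List.drop [' '].length (' ' :: rest) = rest from rfl]
        rw [ih rest [] (cur.reverse :: acc) (by simpa using Nat.le_of_succ_le_succ h)]
        have := pvRows_ne_nil rest
        cases hr : pvRows rest with
        | nil => exact absurd hr this
        | cons r rs => simp [pvRows, hr]
      · have hpre : [' '].isPrefixOf (c :: rest) = false := by
          simp [List.isPrefixOf, BEq.beq]
          intro hh; exact absurd hh.symm hc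
        rw [PySem.Chars.splitOn.go, if_neg (by simp [hpre])]
        rw [ih rest (c :: cur) acc (by simpa using Nat.le_of_succ_le_succ h)]
        cases hr : pvRows rest with
        | nil => simp [pvRows, hr, hc]
        | cons r rs => simp [pvRows, hr, hc]

lemma pvSplitOn_space (cs : List Char) : PySem.Chars.splitOn cs [' '] = pvRows cs := by
  have h := pvGo_space (cs.length + 1) cs [] [] (by omega)
  rw [PySem.Chars.splitOn, h]
  have := pvRows_ne_nil cs
  cases hr : pvRows cs with
  | nil => exact absurd hr this
  | cons r rs => simp

lemma pvRows_append_space (ds : List Char) : pvRows (ds ++ [' ']) = pvRows ds ++ [[]] := by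
  induction ds with
  | nil => simp [pvRows]
  | cons c s ih =>
    by_cases hc : c = ' '
    · simp [pvRows, hc, ih]
    · have := pvRows_ne_nil s
      cases hr : pvRows s with
      | nil => exact absurd hr this
      | cons r rs => simp [pvRows, hc, ih, hr]

lemma pvFlatMap_eq_minesTail (rows : List (List Char)) (y0 : Int) :
    (PySem.List.enumerate rows y0).flatMap (fun yr =>
      (PySem.List.enumerate yr.2).filterMap fun xc =>
        if xc.2 = 'X' then some (xc.1, yr.1) else none) = pvMinesTail rows y0 := by
  induction rows generalizing y0 with
  | nil => simp [pvMinesTail]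
  | cons r rs ih =>
    simp [PySem.List.enumerate_cons, pvMinesTail, pvRowMines, ih]

lemma pvRowMines_cons (c : Char) (r : List Char) (x0 y : Int) :
    pvRowMines (c :: r) x0 y =
      (if c = 'X' then [(x0, y)] else []) ++ pvRowMines r (x0 + 1) y := by
  by_cases hc : c = 'X' <;>
    simp [pvRowMines, PySem.List.enumerate_cons, hc]

lemma pvFoldA_congr (cs : List Char) (n s : Int) (init : Int × Int × PySem.Set (Int × Int))
    (h : ∀ p ∈ PySem.List.enumerate cs s, p.2 = ' ' → p.1 ≠ n - 1) :
    (PySem.List.enumerate cs s).foldl (pvStepA n) init = cs.foldl pvStepS init := by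
  have hcongr : (PySem.List.enumerate cs s).foldl (pvStepA n) init =
      (PySem.List.enumerate cs s).foldl (fun st p => pvStepS st p.2) init := by
    refine PySem.List.foldl_congr_mem _ _ _ _ ?_
    intro acc p hp
    by_cases hsp : p.2 = ' '
    · have hne := h p hp hsp
      simp [pvStepA, pvStepS, hsp, hne]
    · simp [pvStepA, pvStepS, hsp]
  rw [hcongr, ← PySem.List.map_snd_enumerate cs s, List.foldl_map]
  simp [PySem.List.map_snd_enumerate]

lemma pvFoldS_spec (cs : List Char) : ∀ (x y : Int) (m : PySem.Set (Int × Int)),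
    cs.foldl pvStepS (x, y, m) =
      (pvWidth (pvRows cs) x,
       y + ((pvRows cs).length : Int) - 1,
       List.foldl PySem.Set.add m (pvMines (pvRows cs) x y)) := by
  induction cs with
  | nil =>
    intro x y m
    simp [pvRows, pvWidth, pvMines, pvMinesTail, pvRowMines]
  | cons c rest ih =>
    intro x y m
    have hne := pvRows_ne_nil rest
    cases hr : pvRows rest with
    | nil => exact absurd hr hne
    | cons r rs =>
      by_cases hc : c = ' '
      · subst hc
        have hstep : pvStepS (x, y, m) ' ' = (0, y + 1, m) := by simp [pvStepS]
        simp only [List.foldl_cons, hstep]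
        rw [ih 0 (y + 1) m]
        simp only [pvRows, hr, pvWidth, pvMines, pvRowMines, List.length_cons, Prod.mk.injEq]
        refine ⟨?_, by push_cast [List.length_cons]; ring, rfl⟩
        cases rs with
        | nil => simp
        | cons r' rs' => simp
      · have hstep : pvStepS (x, y, m) c =
            (x + 1, y, if c = 'X' then PySem.Set.add m (x, y) else m) := by
          simp [pvStepS, hc]
        simp only [List.foldl_cons, hstep]
        rw [ih (x + 1) y (if c = 'X' then PySem.Set.add m (x, y) else m)]
        simp only [pvRows, if_neg hc, hr, pvWidth, pvMines, pvRowMines_cons, Prod.mk.injEq]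
        refine ⟨?_, rfl, ?_⟩
        · cases rs with
          | nil => simp; ring
          | cons r' rs' => simp
        · by_cases hx : c = 'X' <;> simp [hx]

lemma pvMines_eq_minesTail (rows : List (List Char)) (y : Int) :
    pvMines rows 0 y = pvMinesTail rows y := by
  cases rows with
  | nil => simp [pvMines, pvMinesTail]
  | cons r rs => simp [pvMines, pvMinesTail]

lemma pvWidth_zero (rows : List (List Char)) (h : rows ≠ []) :
    pvWidth rows 0 = (((PySem.List.pyGet? rows (-1)).getD []).length : Int) := by
  cases rows with
  | nil => exact absurd rfl h
  | cons r rs =>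
    cases rs with
    | nil => simp [pvWidth, PySem.List.pyGet?, PySem.List.pyIdx?]
    | cons r' rs' =>
      simp only [pvWidth, if_neg (by simp : ¬(r' :: rs' = []))]
      have hg : PySem.List.pyGet? (r :: r' :: rs') (-1) = (r :: r' :: rs').getLast? := by
        simp [PySem.List.pyGet?, PySem.List.pyIdx?, List.getLast?_eq_getElem?]
      rw [hg, List.getLast?_cons_cons, ← List.getLastD_eq_getLast?]

lemma pvAssemble (t : List Char) :
    ((t.foldl pvStepS ((0:Int), (0:Int), (PySem.Set.empty : PySem.Set (Int × Int)))).2.2,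
     (t.foldl pvStepS ((0:Int), (0:Int), (PySem.Set.empty : PySem.Set (Int × Int)))).1,
     (t.foldl pvStepS ((0:Int), (0:Int), (PySem.Set.empty : PySem.Set (Int × Int)))).2.1 + 1)
    = (PySem.Set.ofList ((PySem.List.enumerate (pvRows t)).flatMap fun yr =>
        (PySem.List.enumerate yr.2).filterMap fun xc => if xc.2 = 'X' then some (xc.1, yr.1) else none),
       (((PySem.List.pyGet? (pvRows t) (-1)).getD []).length : Int),
       ((pvRows t).length : Int)) := by
  rw [pvFoldS_spec t 0 0 PySem.Set.empty]
  have hne := pvRows_ne_nil t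
  refine Prod.ext ?_ (Prod.ext ?_ ?_)
  · simp only [pvFlatMap_eq_minesTail, ← pvMines_eq_minesTail, PySem.Set.ofList_eq_foldl]
    rfl
  · simpa using pvWidth_zero (pvRows t) hne
  · simp only []
    have : (pvRows t).length ≠ 0 := by simpa using hne
    omega

lemma pvStepA_last (ds : List Char) (st : Int × Int × PySem.Set (Int × Int)) :
    pvStepA (((ds ++ [' ']).length : Nat) : Int) st ((0 : Int) + (ds.length : Int), ' ') = st := by
  have h2 : (0 : Int) + (ds.length : Int) = ((((ds ++ [' ']).length : Nat)) : Int) - 1 := by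
    simp [List.length_append]
  simp [pvStepA, h2]

-- ===== VERDICT (by name: the statement is the Claim_ definition above) =====
theorem polje_v_mine_spec : Claim_equal_polje_v_mine := by
  intro polje _
  show polje_v_mine polje = polje_v_mine_alt polje
  unfold polje_v_mine polje_v_mine_alt
  simp only [pvSplitOn_space]
  generalize polje.toList = cs
  by_cases hE : PySem.Chars.endswith cs [' '] = true
  · obtain ⟨ds, hds⟩ : [' '] <:+ cs := (PySem.Chars.endswith_iff cs [' ']).mp hE
    subst hds
    simp only [hE, if_pos, PySem.List.enumerate_append, PySem.List.enumerate_cons,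
      PySem.List.enumerate_nil, List.foldl_append, List.foldl_cons, List.foldl_nil,
      pvStepA_last, pvRows_append_space, List.dropLast_concat]
    rw [pvFoldA_congr (ds) ((ds ++ [' ']).length : Int) 0 (0, 0, PySem.Set.empty) ?_]
    · exact pvAssemble ds
    · intro p hp _
      obtain ⟨k, hk, rfl⟩ := (PySem.List.mem_enumerate_iff _ _ _).mp hp
      simp only [List.length_append, List.length_cons, List.length_nil]
      push_cast
      omega
  · simp only [hE, if_neg, Bool.false_eq_true, not_false_iff]
    rw [pvFoldA_congr cs (cs.length : Int) 0 (0, 0, PySem.Set.empty) ?_]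
    · exact pvAssemble cs
    · intro p hp hsp
      obtain ⟨k, hk, rfl⟩ := (PySem.List.mem_enumerate_iff _ _ _).mp hp
      intro hkk
      apply hE
      rw [PySem.Chars.endswith_iff]
      have hcs : cs ≠ [] := by intro h; subst h; simp at hk
      have hk' : k = cs.length - 1 := by omega
      refine ⟨cs.dropLast, ?_⟩
      have h1 := List.dropLast_append_getLast hcs
      have h2 : cs.getLast hcs = ' ' := by
        rw [List.getLast_eq_getElem]
        have hsp' : cs[k] = ' ' := hsp
        have hk2 : cs.length - 1 = k := by omega
        simp only [hk2]
        exact hsp'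
      rw [← h2]
      exact h1
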